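-- pv_equiv track=rewrite | github.com/Pierre-LaurentC/MS-HS-Fusion-Study-Case | instrument_models.py | shape_target_to_fit_decim
-- ===== SOURCE A (Python) =====
-- def shape_target_to_fit_decim(shape_target, di, dj):
--     padding1 = 0
--     if shape_target[0] % di != 0:
--         while (shape_target[0] + padding1) % di != 0:
--             padding1 += 1
--
--     padding2 = 0
--     if shape_target[1] % dj != 0:
--         while (shape_target[1] + padding2) % dj != 0:
--             padding2 += 1
--
--     new_shape_target = (shape_target[0] + padding1, shape_target[1] + padding2)
--     return new_shape_target
-- ===== SOURCE B (Python) =====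
-- def shape_target_to_fit_decim(shape_target, di, dj):
--     i, j = shape_target
--     return (i + (-i) % abs(di), j + (-j) % abs(dj))
-- ===== Notes on version B (the rewrite author's own statement) =====
-- stated objective: faster
-- what changed: Replaces each while-loop linear search for the padding with the closed-form modular expression (-x) % abs(d), turning an O(di+dj) scan into O(1) arithmetic with no loops or branches.
import Mathlib
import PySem

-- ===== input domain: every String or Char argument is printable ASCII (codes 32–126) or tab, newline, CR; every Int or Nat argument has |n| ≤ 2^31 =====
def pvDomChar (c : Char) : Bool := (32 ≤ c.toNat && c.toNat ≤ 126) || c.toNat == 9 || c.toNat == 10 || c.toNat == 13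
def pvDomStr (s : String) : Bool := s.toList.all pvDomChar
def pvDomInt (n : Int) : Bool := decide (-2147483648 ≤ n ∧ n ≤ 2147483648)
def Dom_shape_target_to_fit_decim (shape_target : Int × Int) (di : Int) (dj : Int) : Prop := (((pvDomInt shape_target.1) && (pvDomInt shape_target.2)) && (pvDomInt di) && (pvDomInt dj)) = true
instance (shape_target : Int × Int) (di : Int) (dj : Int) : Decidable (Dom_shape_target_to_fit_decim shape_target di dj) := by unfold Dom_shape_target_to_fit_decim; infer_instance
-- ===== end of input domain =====

-- B replaces each while-loop padding search by the closed form (-x) % abs(d): O(1) arithmetic instead of an O(di+dj) scan.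

-- ===== PORT A =====
-- the while loop 'while (x+p) % di != 0: p += 1'; fuel (di.natAbs + 1) is a totality
-- guard only: under Pre_ (di ≠ 0) the loop stops after at most di.natAbs steps.
def pvPadLoop (x di : Int) : Nat → Int → Int
  | 0, p => p
  | f + 1, p => if PySem.Int.mod (x + p) di ≠ 0 then pvPadLoop x di f (p + 1) else p

def shape_target_to_fit_decim (shape_target : Int × Int) (di : Int) (dj : Int) : Int × Int :=
  let padding1 := if PySem.Int.mod shape_target.1 di ≠ 0 then pvPadLoop shape_target.1 di (di.natAbs + 1) 0 else 0
  let padding2 := if PySem.Int.mod shape_target.2 dj ≠ 0 then pvPadLoop shape_target.2 dj (dj.natAbs + 1) 0 else 0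
  (shape_target.1 + padding1, shape_target.2 + padding2)

-- ===== PORT B =====
def shape_target_to_fit_decim_alt (shape_target : Int × Int) (di : Int) (dj : Int) : Int × Int :=
  (shape_target.1 + PySem.Int.mod (-shape_target.1) |di|,
   shape_target.2 + PySem.Int.mod (-shape_target.2) |dj|)

-- ===== PRECONDITION & SPEC =====
-- Pre_ excludes exactly di = 0 / dj = 0, on which Python A raises ZeroDivisionError (B too).
def Pre_shape_target_to_fit_decim (shape_target : Int × Int) (di : Int) (dj : Int) : Prop := di ≠ 0 ∧ dj ≠ 0
instance (shape_target : Int × Int) (di : Int) (dj : Int) : Decidable (Pre_shape_target_to_fit_decim shape_target di dj) := by unfold Pre_shape_target_to_fit_decim; infer_instance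
def pvWitness_shape_target_to_fit_decim : (Int × Int) × Int × Int := ((7, 5), 3, 4)
def Spec_shape_target_to_fit_decim (shape_target : Int × Int) (di : Int) (dj : Int) (out : Int × Int) : Prop := out = shape_target_to_fit_decim_alt shape_target di dj
instance (shape_target : Int × Int) (di : Int) (dj : Int) (out : Int × Int) : Decidable (Spec_shape_target_to_fit_decim shape_target di dj out) := by unfold Spec_shape_target_to_fit_decim; infer_instance

-- ===== CLAIM (what is proved, stated in full; the proofs are below) =====
def Claim_equal_shape_target_to_fit_decim : Prop := ∀ (shape_target : Int × Int) (di : Int) (dj : Int), Dom_shape_target_to_fit_decim shape_target di dj → Pre_shape_target_to_fit_decim shape_target di dj → Spec_shape_target_to_fit_decim shape_target di dj (shape_target_to_fit_decim shape_target di dj)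

-- ===== LEMMAS AND PROOFS =====

-- divisibility by di is divisibility by |di|
theorem pv_dvd_abs (di a : Int) : di ∣ a ↔ |di| ∣ a := (abs_dvd di a).symm

-- the loop, started at p ≤ m with enough fuel, stops exactly at m = (-x) emod |di|
theorem pvPadLoop_eq (x di : Int) (hdi : di ≠ 0) :
    ∀ (f : Nat) (p : Int), 0 ≤ p → p ≤ (-x).emod |di| → ((-x).emod |di| - p).toNat < f →
      pvPadLoop x di f p = (-x).emod |di| := by
  have habs : (0:Int) < |di| := abs_pos.mpr hdi
  have hxm : |di| ∣ (x + (-x).emod |di|) := by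
    exact ⟨-(-x / |di|), by rw [show ((-x).emod |di|) = -x % |di| from rfl, Int.emod_def]; ring⟩
  intro f
  induction f with
  | zero => intro p _ _ hf; omega
  | succ f ih =>
    intro p hp0 hpm hf
    rcases eq_or_lt_of_le hpm with heq | hlt
    · have hz : PySem.Int.mod (x + p) di = 0 := by
        rw [PySem.Int.mod_eq_zero_iff_dvd, pv_dvd_abs]
        exact heq ▸ hxm
      subst heq
      rw [pvPadLoop, if_neg (by simpa using hz)]
    · have hnz : PySem.Int.mod (x + p) di ≠ 0 := by
        rw [Ne, PySem.Int.mod_eq_zero_iff_dvd, pv_dvd_abs]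
        intro hdvd
        have hdiff : |di| ∣ ((-x).emod |di| - p) := by
          have := Int.dvd_sub hxm hdvd
          simpa using this
        have hlt2 : (-x).emod |di| < |di| := Int.emod_lt_of_pos _ habs
        have := Int.le_of_dvd (by omega) hdiff
        omega
      rw [pvPadLoop, if_pos hnz]
      exact ih (p + 1) (by omega) (by omega) (by omega)

-- one coordinate of A equals the closed form of B
theorem pv_coord_eq (x di : Int) (hdi : di ≠ 0) :
    x + (if PySem.Int.mod x di ≠ 0 then pvPadLoop x di (di.natAbs + 1) 0 else 0)
      = x + PySem.Int.mod (-x) |di| := by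
  have habs : (0:Int) < |di| := abs_pos.mpr hdi
  have hmod : PySem.Int.mod (-x) |di| = (-x).emod |di| :=
    PySem.Int.mod_eq_emod_of_pos habs
  by_cases h : PySem.Int.mod x di = 0
  · have hdvd : di ∣ x := (PySem.Int.mod_eq_zero_iff_dvd x di).mp h
    have : (-x).emod |di| = 0 :=
      Int.emod_eq_zero_of_dvd (by rw [Int.dvd_neg]; exact (pv_dvd_abs di x).mp hdvd)
    simp [h, hmod, this]
  · have hm0 : (-x).emod |di| ≠ 0 := by
      intro h0
      apply h
      rw [PySem.Int.mod_eq_zero_iff_dvd, pv_dvd_abs]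
      have := Int.dvd_of_emod_eq_zero h0
      rwa [Int.dvd_neg] at this
    have hmlt : (-x).emod |di| < |di| := Int.emod_lt_of_pos _ habs
    have hm0' : 0 ≤ (-x).emod |di| := Int.emod_nonneg _ (by omega)
    have habs_eq : |di| = (di.natAbs : Int) := Int.abs_eq_natAbs di
    rw [if_pos h, pvPadLoop_eq x di hdi (di.natAbs + 1) 0 le_rfl hm0' (by omega), hmod]

-- ===== VERDICT (by name: the statement is the Claim_ definition above) =====
theorem shape_target_to_fit_decim_spec : Claim_equal_shape_target_to_fit_decim := by
  intro st di dj _ hpre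
  unfold Spec_shape_target_to_fit_decim shape_target_to_fit_decim shape_target_to_fit_decim_alt
  simp only []
  exact Prod.ext (pv_coord_eq st.1 di hpre.1) (pv_coord_eq st.2 dj hpre.2)
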